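-- pv_equiv track=rewrite | github.com/raphaeldelhomenede/tifsec-nsi-rf-gd | TNSI/seances/pratique/html/consignes/sujets/2025-NSI/21/corrige/exercice2.py | positifs
-- ===== SOURCE A (Python) =====
-- def positifs(pile):
--     '''Renvoie une pile contenant les éléments positifs de pile, dans le même ordre.
--     Ne modifie pas la pile d'origine.'''
--     copie = pile.copy()
--     pile_positifs = []
--     temp = []
--
--     while copie:
--         valeur = copie.pop()
--         if valeur >= 0:
--             temp.append(valeur)
--
--     # remettre dans l'ordre original
--     while temp:
--         pile_positifs.append(temp.pop())
--
--     return pile_positifs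
-- ===== SOURCE B (Python) =====
-- def positifs(pile):
--     '''Renvoie une pile contenant les éléments positifs de pile, dans le même ordre.
--     Ne modifie pas la pile d'origine.'''
--     resultat = []
--     for valeur in pile:
--         if valeur >= 0:
--             resultat.append(valeur)
--     return resultat
-- ===== Notes on version B (the rewrite author's own statement) =====
-- stated objective: simpler
-- what changed: Single forward pass appending non-negative elements directly, instead of A's two destructive pop loops through a temporary stack (reverse then re-reverse).
import Mathlib
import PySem

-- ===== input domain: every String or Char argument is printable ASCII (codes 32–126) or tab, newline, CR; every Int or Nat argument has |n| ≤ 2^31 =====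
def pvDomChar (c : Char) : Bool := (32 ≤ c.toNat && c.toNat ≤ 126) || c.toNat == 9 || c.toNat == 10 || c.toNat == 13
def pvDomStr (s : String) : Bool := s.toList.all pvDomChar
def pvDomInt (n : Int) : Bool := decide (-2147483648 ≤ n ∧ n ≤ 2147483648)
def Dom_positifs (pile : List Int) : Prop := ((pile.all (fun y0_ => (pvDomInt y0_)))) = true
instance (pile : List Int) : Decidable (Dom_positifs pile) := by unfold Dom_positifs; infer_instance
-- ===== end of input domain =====

-- B replaces A's two destructive pop loops (reverse into a temp stack, then re-reverse) with one forward pass; objective: simpler.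


-- ===== PORT A =====
-- first while loop: pop from the end of `copie`, push the non-negatives onto `temp`
def positifsLoop1 (copie temp : List Int) : List Int :=
  match h : copie.getLast? with
  | none => temp
  | some valeur =>
      positifsLoop1 copie.dropLast (if valeur ≥ 0 then temp ++ [valeur] else temp)
termination_by copie.length
decreasing_by
  cases copie with
  | nil => simp at h
  | cons x xs => simp [List.length_dropLast]

-- second while loop: pop from the end of `temp`, push onto `pile_positifs`
def positifsLoop2 (temp pile_positifs : List Int) : List Int :=
  match h : temp.getLast? with
  | none => pile_positifs
  | some v =>
      positifsLoop2 temp.dropLast (pile_positifs ++ [v])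
termination_by temp.length
decreasing_by
  cases temp with
  | nil => simp at h
  | cons x xs => simp [List.length_dropLast]

def positifs (pile : List Int) : List Int :=
  positifsLoop2 (positifsLoop1 pile []) []

-- ===== PORT B =====
-- single forward pass, appending each non-negative element to the result
def positifs_alt (pile : List Int) : List Int :=
  pile.foldl (fun resultat valeur => if valeur ≥ 0 then resultat ++ [valeur] else resultat) []

-- ===== PRECONDITION & SPEC =====
def Spec_positifs (pile : List Int) (out : List Int) : Prop := out = positifs_alt pile
instance (pile : List Int) (out : List Int) : Decidable (Spec_positifs pile out) := by unfold Spec_positifs; infer_instance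

-- ===== CLAIM (what is proved, stated in full; the proofs are below) =====
def Claim_equal_positifs : Prop := ∀ (pile : List Int), Dom_positifs pile → Spec_positifs pile (positifs pile)

-- ===== LEMMAS AND PROOFS =====

theorem positifsLoop1_eq (copie temp : List Int) :
    positifsLoop1 copie temp = temp ++ (copie.filter (fun v => decide (v ≥ 0))).reverse := by
  induction copie using List.reverseRecOn generalizing temp with
  | nil => simp [positifsLoop1]
  | append_singleton xs v ih =>
      rw [positifsLoop1]
      split
      · next h => simp [List.getLast?_concat] at h
      · next valeur h =>
          rw [List.getLast?_concat] at h
          have hveq : v = valeur := by simpa using h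
          subst hveq
          by_cases hv : v ≥ 0 <;>
            simp [hv, ih, List.dropLast_concat, List.filter_append]

theorem positifsLoop2_eq (temp acc : List Int) :
    positifsLoop2 temp acc = acc ++ temp.reverse := by
  induction temp using List.reverseRecOn generalizing acc with
  | nil => simp [positifsLoop2]
  | append_singleton xs v ih =>
      rw [positifsLoop2]
      split
      · next h => simp [List.getLast?_concat] at h
      · next w h =>
          rw [List.getLast?_concat] at h
          have hveq : v = w := by simpa using h
          subst hveq
          simp [List.dropLast_concat, ih]

theorem positifs_alt_eq (pile : List Int) :
    positifs_alt pile = pile.filter (fun v => decide (v ≥ 0)) := by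
  unfold positifs_alt
  have h : ∀ (xs acc : List Int),
      xs.foldl (fun resultat valeur => if valeur ≥ 0 then resultat ++ [valeur] else resultat) acc
        = acc ++ xs.filter (fun v => decide (v ≥ 0)) := by
    intro xs
    induction xs with
    | nil => simp
    | cons x xs ih =>
        intro acc
        by_cases hx : x ≥ 0 <;> simp [List.foldl, hx, ih, List.filter]
  simpa using h pile []

-- ===== VERDICT (by name: the statement is the Claim_ definition above) =====
theorem positifs_spec : Claim_equal_positifs := by
  intro pile _
  unfold Spec_positifs positifs
  rw [positifsLoop1_eq, positifsLoop2_eq, positifs_alt_eq]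
  simp
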